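-- pv_equiv track=rewrite | github.com/pypi-data/pypi-mirror-385 | packages/glaip-sdk/glaip_sdk-0.0.20-py3-none-any.whl/glaip_sdk/cli/utils.py | _calculate_consecutive_bonus
-- ===== SOURCE A (Python) =====
-- def _calculate_consecutive_bonus(search: str, target: str) -> int:
--     """Calculate bonus for consecutive character matches."""
--     consecutive = 0
--     max_consecutive = 0
--     search_idx = 0
--
--     for char in target:
--         if search_idx < len(search) and search[search_idx] == char:
--             consecutive += 1
--             max_consecutive = max(max_consecutive, consecutive)
--             search_idx += 1
--         else:
--             consecutive = 0
--
--     return max_consecutive * 10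
-- ===== SOURCE B (Python) =====
-- def _max_true_run(flags):
--     """Longest run of True, by peeling off one whole run at a time."""
--     best = 0
--     i = 0
--     while i < len(flags):
--         if not flags[i]:
--             i += 1
--         else:
--             k = i
--             while k < len(flags) and flags[k]:
--                 k += 1
--             best = max(best, k - i)
--             i = k
--     return best
--
--
-- def _calculate_consecutive_bonus(search: str, target: str) -> int:
--     """Calculate bonus for consecutive character matches."""
--     matched = []
--     search_idx = 0
--     for char in target:
--         if search_idx < len(search) and search[search_idx] == char:
--             matched.append(True)
--             search_idx += 1
--         else:
--             matched.append(False)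
--     return _max_true_run(matched) * 10
-- ===== Notes on version B (the rewrite author's own statement) =====
-- stated objective: alternative
-- what changed: A's single intertwined pass (counter + running max + search index) is split into building the boolean match-flag list first and then finding the longest True-run by a separate recursive run-peeling helper.
import Mathlib
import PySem

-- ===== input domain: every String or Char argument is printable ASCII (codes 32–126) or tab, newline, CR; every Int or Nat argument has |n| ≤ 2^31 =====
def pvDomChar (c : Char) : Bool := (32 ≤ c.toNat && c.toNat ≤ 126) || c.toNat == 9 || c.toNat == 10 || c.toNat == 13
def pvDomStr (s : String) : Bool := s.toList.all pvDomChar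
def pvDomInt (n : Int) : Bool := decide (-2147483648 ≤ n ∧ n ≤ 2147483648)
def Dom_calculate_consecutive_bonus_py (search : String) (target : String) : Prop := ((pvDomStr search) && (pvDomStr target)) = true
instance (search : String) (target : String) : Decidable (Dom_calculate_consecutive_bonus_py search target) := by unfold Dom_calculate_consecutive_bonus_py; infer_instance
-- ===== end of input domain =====

-- B builds the boolean match list first and finds the longest True-run by a
-- separate recursive run-peeling helper, instead of A's intertwined counter pass
-- (objective: alternative decomposition, same cost).

-- ===== PORT A =====
def calculate_consecutive_bonus_py (search : String) (target : String) : Int :=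
  (target.toList.foldl
    (fun (st : Int × Int × Int) char =>
      if st.2.2 < PySem.Str.len search ∧
          PySem.List.pyGet? search.toList st.2.2 = some char then
        (st.1 + 1, max st.2.1 (st.1 + 1), st.2.2 + 1)
      else
        (0, st.2.1, st.2.2))
    (0, 0, 0)).2.1 * 10

-- ===== PORT B =====
-- inner while loop `k = i; while k < len(flags) and flags[k]: k += 1` counts the
-- leading Trues from position i, i.e. pvLeadTrue of the remaining list
def pvLeadTrue : List Bool → Nat
  | true :: t => pvLeadTrue t + 1
  | _ => 0

theorem pvLeadTrue_pos {fs : List Bool} (h : fs.getD 0 false = true) : 1 ≤ pvLeadTrue fs := by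
  cases fs with
  | nil => simp at h
  | cons b t => cases b with
    | true => simp [pvLeadTrue]
    | false => simp at h

-- port of B's while loop _max_true_run: state (best, i), one whole run peeled per step
def pvMaxRunLoop (flags : List Bool) (best i : Nat) : Nat :=
  if _hlt : i < flags.length then
    if flags.getD i false = false then
      pvMaxRunLoop flags best (i + 1)
    else
      pvMaxRunLoop flags (max best ((i + pvLeadTrue (flags.drop i)) - i)) (i + pvLeadTrue (flags.drop i))
  else best
termination_by flags.length - i
decreasing_by
  · omega
  · have h1 : 1 ≤ pvLeadTrue (flags.drop i) := by
      apply pvLeadTrue_pos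
      rw [List.getD_eq_getElem?_getD, List.getElem?_drop, Nat.add_zero, ← List.getD_eq_getElem?_getD]
      rename_i h
      simp only [Bool.not_eq_false] at h
      exact h
    omega

def calculate_consecutive_bonus_py_alt (search : String) (target : String) : Int :=
  (pvMaxRunLoop
    (target.toList.foldl
      (fun (st : List Bool × Int) char =>
        if st.2 < PySem.Str.len search ∧
            PySem.List.pyGet? search.toList st.2 = some char then
          (st.1 ++ [true], st.2 + 1)
        else
          (st.1 ++ [false], st.2))
      ([], 0)).1 0 0 : Int) * 10

-- ===== PRECONDITION & SPEC =====
def Spec_calculate_consecutive_bonus_py (search : String) (target : String) (out : Int) : Prop := out = calculate_consecutive_bonus_py_alt search target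
instance (search : String) (target : String) (out : Int) : Decidable (Spec_calculate_consecutive_bonus_py search target out) := by unfold Spec_calculate_consecutive_bonus_py; infer_instance

-- ===== CLAIM (what is proved, stated in full; the proofs are below) =====
def Claim_equal_calculate_consecutive_bonus_py : Prop := ∀ (search : String) (target : String), Dom_calculate_consecutive_bonus_py search target → Spec_calculate_consecutive_bonus_py search target (calculate_consecutive_bonus_py search target)

-- ===== LEMMAS AND PROOFS =====

-- reference recursive form of the longest True-run (proof-only helper)
def pvMaxTrueRun : List Bool → Nat
  | [] => 0
  | false :: t => pvMaxTrueRun t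
  | true :: t => max (pvLeadTrue t + 1) (pvMaxTrueRun (t.drop (pvLeadTrue t)))
termination_by fs => fs.length
decreasing_by
  all_goals simp [List.length_drop]

-- B's while loop computes best ⊔ the reference recursive form on the remaining list
theorem pvMaxRunLoop_eq (flags : List Bool) : ∀ (n best i : Nat), flags.length - i = n →
    pvMaxRunLoop flags best i = max best (pvMaxTrueRun (flags.drop i)) := by
  intro n
  induction n using Nat.strong_induction_on with
  | _ n ih =>
    intro best i hn
    rw [pvMaxRunLoop]
    by_cases hlt : i < flags.length
    · rw [dif_pos hlt]
      have hdrop : flags.drop i = flags[i] :: flags.drop (i + 1) :=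
        List.drop_eq_getElem_cons hlt
      have hgd : flags.getD i false = flags[i] := List.getD_eq_getElem flags false hlt
      by_cases hb : flags[i] = false
      · rw [if_pos (by rw [hgd, hb])]
        rw [ih (flags.length - (i + 1)) (by omega) best (i + 1) rfl]
        rw [hdrop, hb,
          show pvMaxTrueRun (false :: flags.drop (i + 1)) = pvMaxTrueRun (flags.drop (i + 1)) from by
            rw [pvMaxTrueRun]]
      · rw [if_neg (by rw [hgd]; simpa using hb)]
        have hbt : flags[i] = true := by simpa using hb
        have hL : pvLeadTrue (flags.drop i) = pvLeadTrue (flags.drop (i + 1)) + 1 := by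
          rw [hdrop, hbt]; rfl
        have hk : i + pvLeadTrue (flags.drop i) = i + 1 + pvLeadTrue (flags.drop (i + 1)) := by
          omega
        rw [ih (flags.length - (i + pvLeadTrue (flags.drop i))) (by omega) _ _ rfl]
        have hdk : flags.drop (i + pvLeadTrue (flags.drop i))
                 = (flags.drop (i + 1)).drop (pvLeadTrue (flags.drop (i + 1))) := by
          rw [hk, List.drop_drop]
        rw [hdk]
        have hmr : pvMaxTrueRun (flags.drop i)
                 = max (pvLeadTrue (flags.drop (i + 1)) + 1)
                       (pvMaxTrueRun ((flags.drop (i + 1)).drop (pvLeadTrue (flags.drop (i + 1))))) := by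
          rw [hdrop, hbt, pvMaxTrueRun]
        rw [hmr]
        omega
    · rw [dif_neg hlt]
      rw [List.drop_of_length_le (by omega)]
      rw [show pvMaxTrueRun [] = 0 from by rw [pvMaxTrueRun]]
      omega

-- the match flags produced while walking `ts` with search index `i` (Nat model)
def pvFlags (search : List Char) : List Char → Nat → List Bool
  | [], _ => []
  | ch :: t, i =>
    if i < search.length ∧ search[i]? = some ch then
      true :: pvFlags search t (i + 1)
    else
      false :: pvFlags search t i

-- best run recorded by A's counter scan over flags, starting with current run c
def pvH (c : Nat) : List Bool → Nat
  | [] => 0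
  | true :: t => max (c + 1) (pvH (c + 1) t)
  | false :: t => pvH 0 t

theorem pvH_char : ∀ (fs : List Bool) (c : Nat),
    pvH c fs = if pvLeadTrue fs = 0 then pvMaxTrueRun fs
               else max (c + pvLeadTrue fs) (pvMaxTrueRun (fs.drop (pvLeadTrue fs))) := by
  intro fs
  induction fs with
  | nil => intro c; simp [pvH, pvLeadTrue, pvMaxTrueRun]
  | cons b t ih =>
    intro c
    cases b with
    | false =>
      show pvH 0 t = if (0 : Nat) = 0 then pvMaxTrueRun (false :: t)
                     else max (c + 0) (pvMaxTrueRun ((false :: t).drop 0))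
      rw [if_pos rfl]
      have hm : pvMaxTrueRun (false :: t) = pvMaxTrueRun t := by rw [pvMaxTrueRun]
      rw [hm]
      rw [ih 0]
      split_ifs with h
      · rfl
      · rcases t with _ | ⟨b', t'⟩
        · simp [pvLeadTrue] at h
        · cases b' with
          | false => simp [pvLeadTrue] at h
          | true =>
            have hL : pvLeadTrue (true :: t') = pvLeadTrue t' + 1 := rfl
            rw [hL, List.drop_succ_cons, show pvMaxTrueRun (true :: t')
               = max (pvLeadTrue t' + 1) (pvMaxTrueRun (t'.drop (pvLeadTrue t'))) from by rw [pvMaxTrueRun]]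
            omega
    | true =>
      show max (c + 1) (pvH (c + 1) t)
         = if pvLeadTrue t + 1 = 0 then pvMaxTrueRun (true :: t)
           else max (c + (pvLeadTrue t + 1)) (pvMaxTrueRun ((true :: t).drop (pvLeadTrue t + 1)))
      rw [if_neg (by omega), List.drop_succ_cons, ih (c + 1)]
      split_ifs with h
      · rw [h]; simp
      · omega

theorem pvMaxTrueRun_eq_H (fs : List Bool) : pvMaxTrueRun fs = pvH 0 fs := by
  rw [pvH_char]
  split_ifs with h
  · rfl
  · rcases fs with _ | ⟨b, t⟩
    · simp [pvLeadTrue] at h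
    · cases b with
      | false => simp [pvLeadTrue] at h
      | true =>
        have hL : pvLeadTrue (true :: t) = pvLeadTrue t + 1 := rfl
        rw [hL, List.drop_succ_cons, show pvMaxTrueRun (true :: t)
           = max (pvLeadTrue t + 1) (pvMaxTrueRun (t.drop (pvLeadTrue t))) from by rw [pvMaxTrueRun]]
        omega

theorem pvCond (search : String) (i : Nat) (ch : Char) :
    (((i : Int) < PySem.Str.len search ∧
        PySem.List.pyGet? search.toList (i : Int) = some ch))
    ↔ (i < search.toList.length ∧ search.toList[i]? = some ch) := by
  rw [PySem.List.pyGet?_natCast, PySem.Str.len_eq]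
  constructor
  · rintro ⟨h1, h2⟩
    refine ⟨?_, h2⟩
    have : i < search.length := by exact_mod_cast h1
    simpa [← String.length_toList] using this
  · rintro ⟨h1, h2⟩
    refine ⟨?_, h2⟩
    have : i < search.length := by simpa [← String.length_toList] using h1
    exact_mod_cast this

-- A's fold over ts, from Nat-valued state (c, m, i), returns max m (pvH c flags)
theorem pvA_fold (search : String) : ∀ (ts : List Char) (c m i : Nat),
    (ts.foldl
      (fun (st : Int × Int × Int) char =>
        if st.2.2 < PySem.Str.len search ∧
            PySem.List.pyGet? search.toList st.2.2 = some char then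
          (st.1 + 1, max st.2.1 (st.1 + 1), st.2.2 + 1)
        else
          (0, st.2.1, st.2.2))
      ((c : Int), (m : Int), (i : Int))).2.1
    = ((max m (pvH c (pvFlags search.toList ts i)) : Nat) : Int) := by
  intro ts
  induction ts with
  | nil => intro c m i; simp [pvFlags, pvH]
  | cons ch t ih =>
    intro c m i
    simp only [List.foldl_cons]
    by_cases h : i < search.toList.length ∧ search.toList[i]? = some ch
    · rw [if_pos ((pvCond search i ch).mpr h)]
      have hst : ((c : Int) + 1, max (m : Int) ((c : Int) + 1), (i : Int) + 1)
           = (((c + 1 : Nat) : Int), ((max m (c + 1) : Nat) : Int), ((i + 1 : Nat) : Int)) := by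
        push_cast; rfl
      rw [hst, ih]
      have hf : pvFlags search.toList (ch :: t) i = true :: pvFlags search.toList t (i + 1) := by
        rw [pvFlags, if_pos h]
      rw [hf]
      have : pvH c (true :: pvFlags search.toList t (i + 1))
           = max (c + 1) (pvH (c + 1) (pvFlags search.toList t (i + 1))) := rfl
      rw [this]
      congr 1
      omega
    · rw [if_neg (fun hc => h ((pvCond search i ch).mp hc))]
      have hst : ((0 : Int), (m : Int), (i : Int))
           = (((0 : Nat) : Int), ((m : Nat) : Int), ((i : Nat) : Int)) := by push_cast; rfl
      rw [hst, ih]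
      have hf : pvFlags search.toList (ch :: t) i = false :: pvFlags search.toList t i := by
        simp only [pvFlags, if_neg h]
      rw [hf]
      rfl

-- B's flag-building fold accumulates exactly pvFlags
theorem pvB_fold (search : String) : ∀ (ts : List Char) (acc : List Bool) (i : Nat),
    (ts.foldl
      (fun (st : List Bool × Int) char =>
        if st.2 < PySem.Str.len search ∧
            PySem.List.pyGet? search.toList st.2 = some char then
          (st.1 ++ [true], st.2 + 1)
        else
          (st.1 ++ [false], st.2))
      (acc, (i : Int))).1
    = acc ++ pvFlags search.toList ts i := by
  intro ts
  induction ts with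
  | nil => intro acc i; simp [pvFlags]
  | cons ch t ih =>
    intro acc i
    simp only [List.foldl_cons]
    by_cases h : i < search.toList.length ∧ search.toList[i]? = some ch
    · rw [if_pos ((pvCond search i ch).mpr h)]
      have hi : ((i : Int) + 1) = (((i + 1 : Nat) : Int)) := by push_cast; rfl
      rw [hi, ih]
      rw [show pvFlags search.toList (ch :: t) i = true :: pvFlags search.toList t (i + 1) from by
        rw [pvFlags, if_pos h]]
      simp
    · rw [if_neg (fun hc => h ((pvCond search i ch).mp hc))]
      rw [ih]
      simp only [pvFlags, if_neg h, List.append_assoc, List.singleton_append]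

-- ===== VERDICT (by name: the statement is the Claim_ definition above) =====
theorem calculate_consecutive_bonus_py_spec : Claim_equal_calculate_consecutive_bonus_py := by
  intro search target _
  show _ = _
  unfold calculate_consecutive_bonus_py calculate_consecutive_bonus_py_alt
  have hA := pvA_fold search target.toList 0 0 0
  have hB := pvB_fold search target.toList [] 0
  simp only [Nat.cast_zero] at hA hB
  rw [hA, hB]
  rw [pvMaxRunLoop_eq _ _ 0 0 rfl]
  simp [pvMaxTrueRun_eq_H]
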